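-- pv_equiv track=rewrite | github.com/kyrie-eleison/codingTestStudy | ch13 DFS&BFS/20.py | solution
-- ===== SOURCE A (Python) =====
-- from itertools import combinations
-- import copy
--
-- def solution(array):
--     n = len(array)
--
--     teacher = []
--     obsCandi = []
--     student = []
--     for i in range(n):
--         for j in range(n):
--             if array[i][j] == "T":
--                 teacher.append((i,j))
--             if array[i][j] == "X":
--                 obsCandi.append((i,j))
--             if array[i][j] == "S":
--                 student.append((i,j))
--
--
--     obsCandi_list = list(combinations(obsCandi, 3))
--
--     for obs in obsCandi_list:
--         array_obs = copy.deepcopy(array)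
--         for o in obs:
--             array_obs[o[0]][o[1]] = "O"
--
--         for t in teacher:
--             contamination(array_obs, t)
--
--         for s in student:
--             if array_obs[s[0]][s[1]] == "S":
--                 return True
--
--     return False
--
-- def contamination(array, t):
--
--     n = len(array)
--     moves = [(-1, 0), (1, 0), (0, -1), (0, 1)]
--     x, y = t[0], t[1]
--
--     for move in moves:
--         x_new, y_new = x + move[0], y + move[1]
--
--
--         while (0 <= x_new <= (n-1)) and (0 <= y_new <= (n-1)):
--
--
--             if array[x_new][y_new] == "O":
--                 break
--
--             else:
--                 array[x_new][y_new] = "T"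
--                 x_new += move[0]
--                 y_new += move[1]
--                 continue
-- ===== SOURCE B (Python) =====
-- def _sees(t, s, block):
--     ti, tj = t
--     si, sj = s
--     if si == ti and sj != tj:
--         lo, hi = (sj, tj) if sj < tj else (tj, sj)
--         return all((si, y) not in block for y in range(lo + 1, hi))
--     if sj == tj and si != ti:
--         lo, hi = (si, ti) if si < ti else (ti, si)
--         return all((x, sj) not in block for x in range(lo + 1, hi))
--     return False
--
--
-- def _some_student_hidden(teachers, students, block):
--     return any(all(not _sees(t, s, block) for t in teachers) for s in students)
--
--
-- def solution(array):
--     n = len(array)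
--     teachers, students, xs = [], [], []
--     blocked = set()
--     for i in range(n):
--         for j in range(n):
--             c = array[i][j]
--             if c == "T":
--                 teachers.append((i, j))
--             elif c == "S":
--                 students.append((i, j))
--             elif c == "X":
--                 xs.append((i, j))
--             elif c == "O":
--                 blocked.add((i, j))
--     m = len(xs)
--     for a in range(m):
--         for b in range(a + 1, m):
--             for c in range(b + 1, m):
--                 block = blocked | {xs[a], xs[b], xs[c]}
--                 if _some_student_hidden(teachers, students, block):
--                     return True
--     return False
-- ===== Notes on version B (the rewrite author's own statement) =====
-- stated objective: faster
-- what changed: Per 3-obstacle combination, A deep-copies the grid and simulates 4-direction contamination spreading from every teacher before checking students; B never copies or mutates a grid and instead tests each (student, teacher) pair directly for line of sight against a set of blocking cells.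
import Mathlib
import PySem

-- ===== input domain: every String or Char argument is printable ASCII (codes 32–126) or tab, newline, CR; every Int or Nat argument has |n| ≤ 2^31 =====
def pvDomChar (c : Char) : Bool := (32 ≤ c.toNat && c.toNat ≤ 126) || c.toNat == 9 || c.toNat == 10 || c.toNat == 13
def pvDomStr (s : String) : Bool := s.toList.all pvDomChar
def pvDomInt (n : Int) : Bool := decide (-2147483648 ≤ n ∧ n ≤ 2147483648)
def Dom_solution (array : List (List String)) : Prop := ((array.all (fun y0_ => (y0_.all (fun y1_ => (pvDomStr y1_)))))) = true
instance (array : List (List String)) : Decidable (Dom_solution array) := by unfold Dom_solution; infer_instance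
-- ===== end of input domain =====

-- B replaces A's per-combination grid deepcopy + 4-direction contamination flood from every
-- teacher by a direct per-(student, teacher) line-of-sight test against a blocker set
-- (objective: faster; return value only — A never mutates its caller-visible argument,
-- it deep-copies the grid first).

-- ===== PORT A =====
def pvCell (g : List (List String)) (i j : Int) : String :=
  PySem.List.pyGetD (PySem.List.pyGetD g i []) j ""

def pvSet (g : List (List String)) (i j : Int) (v : String) : List (List String) :=
  PySem.List.pySetD g i (PySem.List.pySetD (PySem.List.pyGetD g i []) j v)

def pvMarch (n dx dy : Int) : Nat → Int → Int → List (List String) → List (List String)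
  | 0, _, _, g => g
  | f+1, x, y, g =>
    if 0 ≤ x ∧ x ≤ n-1 ∧ 0 ≤ y ∧ y ≤ n-1 then
      if pvCell g x y = "O" then g
      else pvMarch n dx dy f (x+dx) (y+dy) (pvSet g x y "T")
    else g

def pvContamination (g : List (List String)) (t : Int × Int) : List (List String) :=
  let n : Int := g.length
  [((-1 : Int), (0 : Int)), (1, 0), (0, -1), (0, 1)].foldl
    (fun g m => pvMarch n m.1 m.2 n.toNat (t.1 + m.1) (t.2 + m.2) g) g

def pvScanA (array : List (List String)) :
    List (Int × Int) × List (Int × Int) × List (Int × Int) :=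
  let n : Int := array.length
  (PySem.List.pyRange 0 n 1).foldl (fun acc i =>
    (PySem.List.pyRange 0 n 1).foldl (fun acc j =>
      let acc := if pvCell array i j = "T" then (acc.1 ++ [(i,j)], acc.2.1, acc.2.2) else acc
      let acc := if pvCell array i j = "X" then (acc.1, acc.2.1 ++ [(i,j)], acc.2.2) else acc
      if pvCell array i j = "S" then (acc.1, acc.2.1, acc.2.2 ++ [(i,j)]) else acc) acc)
    ([], [], [])

def pvComb2 {α : Type} : List α → List (α × α)
  | [] => []
  | x :: xs => (xs.map (fun y => (x, y))) ++ pvComb2 xs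

def pvComb3 {α : Type} : List α → List (α × α × α)
  | [] => []
  | x :: xs => ((pvComb2 xs).map (fun p => (x, p.1, p.2))) ++ pvComb3 xs

def pvRunCombo (array : List (List String)) (teacher student : List (Int × Int))
    (obs : (Int × Int) × (Int × Int) × (Int × Int)) : Bool :=
  let g := [obs.1, obs.2.1, obs.2.2].foldl (fun g o => pvSet g o.1 o.2 "O") array
  let g := teacher.foldl pvContamination g
  student.any (fun s => pvCell g s.1 s.2 == "S")

def pvALoop (array : List (List String)) (teacher student : List (Int × Int)) :
    List ((Int × Int) × (Int × Int) × (Int × Int)) → Bool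
  | [] => false
  | c :: rest =>
    if pvRunCombo array teacher student c then true else pvALoop array teacher student rest

def solution (array : List (List String)) : Bool :=
  let tri := pvScanA array
  pvALoop array tri.1 tri.2.2 (pvComb3 tri.2.1)

-- ===== PORT B =====
def pvScanB (array : List (List String)) :
    List (Int × Int) × List (Int × Int) × List (Int × Int) × PySem.Set (Int × Int) :=
  let n : Int := array.length
  (PySem.List.pyRange 0 n 1).foldl (fun acc i =>
    (PySem.List.pyRange 0 n 1).foldl (fun acc j =>
      let c := pvCell array i j
      if c = "T" then (acc.1 ++ [(i,j)], acc.2.1, acc.2.2.1, acc.2.2.2)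
      else if c = "S" then (acc.1, acc.2.1 ++ [(i,j)], acc.2.2.1, acc.2.2.2)
      else if c = "X" then (acc.1, acc.2.1, acc.2.2.1 ++ [(i,j)], acc.2.2.2)
      else if c = "O" then (acc.1, acc.2.1, acc.2.2.1, PySem.Set.add acc.2.2.2 (i,j))
      else acc) acc)
    ([], [], [], PySem.Set.empty)

-- canonical row-major list of the cells holding value v

def pvSees (block : PySem.Set (Int × Int)) (t s : Int × Int) : Bool :=
  if s.1 = t.1 ∧ s.2 ≠ t.2 then
    let p := if s.2 < t.2 then (s.2, t.2) else (t.2, s.2)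
    (PySem.List.pyRange (p.1 + 1) p.2 1).all (fun y => !(PySem.Set.contains block (s.1, y)))
  else if s.2 = t.2 ∧ s.1 ≠ t.1 then
    let p := if s.1 < t.1 then (s.1, t.1) else (t.1, s.1)
    (PySem.List.pyRange (p.1 + 1) p.2 1).all (fun x => !(PySem.Set.contains block (x, s.2)))
  else false

def pvHidden (teachers students : List (Int × Int)) (block : PySem.Set (Int × Int)) : Bool :=
  students.any (fun s => teachers.all (fun t => !(pvSees block t s)))

def solution_alt (array : List (List String)) : Bool :=
  let q := pvScanB array
  let teachers := q.1
  let students := q.2.1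
  let xs := q.2.2.1
  let blocked := q.2.2.2
  let m : Int := xs.length
  (PySem.List.pyRange 0 m 1).any (fun a =>
    (PySem.List.pyRange (a + 1) m 1).any (fun b =>
      (PySem.List.pyRange (b + 1) m 1).any (fun c =>
        let block := PySem.Set.union blocked
          (PySem.Set.ofList [PySem.List.pyGetD xs a (0, 0), PySem.List.pyGetD xs b (0, 0),
                             PySem.List.pyGetD xs c (0, 0)])
        pvHidden teachers students block)))

-- ===== PRECONDITION & SPEC =====
-- Pre_ excludes exactly the ragged grids on which A raises IndexError: a row shorter than
-- len(array) is indexed at columns 0..n-1 by A's scan (and likewise by B), so A raises there.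
def Pre_solution (array : List (List String)) : Prop :=
  ∀ r ∈ array, array.length ≤ r.length

instance (array : List (List String)) : Decidable (Pre_solution array) := by
  unfold Pre_solution; infer_instance

def pvWitness_solution : List (List String) :=
  [["S", "X", "X"], ["X", "T", "."], [".", ".", "."]]

def Spec_solution (array : List (List String)) (out : Bool) : Prop := out = solution_alt array
instance (array : List (List String)) (out : Bool) : Decidable (Spec_solution array out) := by
  unfold Spec_solution; infer_instance

-- ===== CLAIM (what is proved, stated in full; the proofs are below) =====
def Claim_equal_solution : Prop :=
  ∀ (array : List (List String)), Dom_solution array → Pre_solution array →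
    Spec_solution array (solution array)

-- ===== LEMMAS AND PROOFS =====
theorem pyGetD_nonneg {α : Type} (xs : List α) {i : Int} (hi : 0 ≤ i) (d : α) :
    PySem.List.pyGetD xs i d = xs.getD i.toNat d := by
  rw [show i = ((i.toNat : Nat) : Int) by omega, PySem.List.pyGetD_natCast]
  simp only [Int.toNat_natCast]

def pvGInv (g : List (List String)) (N : Nat) : Prop :=
  g.length = N ∧ ∀ r ∈ g, N ≤ r.length

theorem pvGInv_set {g : List (List String)} {N : Nat} (hg : pvGInv g N)
    {x : Int} (hx0 : 0 ≤ x) (hxn : x < (N : Int)) (y : Int) (v : String) :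
    pvGInv (pvSet g x y v) N := by
  obtain ⟨hlen, hrows⟩ := hg
  refine ⟨by simp [pvSet, PySem.List.length_pySetD, hlen], ?_⟩
  intro r hr
  unfold pvSet at hr
  rw [PySem.List.pySetD_of_nonneg _ _ hx0] at hr
  rcases List.mem_or_eq_of_mem_set hr with h | h
  · exact hrows r h
  · subst h
    rw [PySem.List.length_pySetD, pyGetD_nonneg _ hx0]
    have hx : x.toNat < g.length := by omega
    rw [List.getD_eq_getElem?_getD, List.getElem?_eq_getElem hx]
    exact hrows _ (List.getElem_mem hx)

theorem pvCell_nonneg (g : List (List String)) {a b : Int} (ha : 0 ≤ a) (hb : 0 ≤ b) :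
    pvCell g a b = (g.getD a.toNat []).getD b.toNat "" := by
  unfold pvCell
  rw [pyGetD_nonneg _ ha, pyGetD_nonneg _ hb]

theorem pvCell_set {g : List (List String)} {N : Nat} (hg : pvGInv g N)
    {x y : Int} (hx0 : 0 ≤ x) (hxn : x < (N : Int)) (hy0 : 0 ≤ y) (hyn : y < (N : Int))
    {a b : Int} (ha : 0 ≤ a) (hb : 0 ≤ b) (v : String) :
    pvCell (pvSet g x y v) a b = if a = x ∧ b = y then v else pvCell g a b := by
  obtain ⟨hlen, hrows⟩ := hg
  have hx : x.toNat < g.length := by omega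
  have hrowlen : N ≤ (g[x.toNat]).length := hrows _ (List.getElem_mem hx)
  have hy : y.toNat < (g[x.toNat]).length := by omega
  have hrow : PySem.List.pyGetD g x [] = g[x.toNat] := by
    rw [pyGetD_nonneg _ hx0, List.getD_eq_getElem?_getD, List.getElem?_eq_getElem hx]
    rfl
  unfold pvSet
  rw [hrow, PySem.List.pySetD_of_nonneg _ _ hx0, PySem.List.pySetD_of_nonneg _ _ hy0,
      pvCell_nonneg _ ha hb, pvCell_nonneg _ ha hb]
  rw [List.getD_eq_getElem?_getD, List.getD_eq_getElem?_getD, List.getElem?_set]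
  by_cases hax : a = x
  · subst hax
    rw [if_pos (by omega), if_pos hx]
    simp only [Option.getD_some]
    rw [List.getD_eq_getElem?_getD, List.getD_eq_getElem?_getD, List.getElem?_set]
    by_cases hby : b = y
    · subst hby
      rw [if_pos (by omega), if_pos hy]
      simp
    · rw [if_neg (by omega)]
      rw [List.getElem?_eq_getElem hx]
      simp [hby]
  · rw [if_neg (by omega)]
    rw [if_neg (by exact fun hc => hax hc.1)]
    rfl

abbrev pvInb (n x y : Int) : Prop := 0 ≤ x ∧ x ≤ n - 1 ∧ 0 ≤ y ∧ y ≤ n - 1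

def pvReach (g : List (List String)) (n dx dy : Int) : Nat → Int → Int → Int → Int → Bool
  | 0, _, _, _, _ => false
  | f+1, x, y, i, j =>
    decide (pvInb n x y) && decide (pvCell g x y ≠ "O") &&
      (decide (x = i ∧ y = j) || pvReach g n dx dy f (x + dx) (y + dy) i j)

theorem pvReach_congr {g g' : List (List String)} {n dx dy : Int}
    (hO : ∀ a b : Int, 0 ≤ a → 0 ≤ b → (pvCell g a b = "O" ↔ pvCell g' a b = "O"))
    (f : Nat) (x y i j : Int) :
    pvReach g n dx dy f x y i j = pvReach g' n dx dy f x y i j := by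
  induction f generalizing x y with
  | zero => rfl
  | succ f ih =>
    simp only [pvReach, ih]
    by_cases hb : pvInb n x y
    · have := hO x y hb.1 hb.2.2.1
      by_cases hc : pvCell g x y = "O"
      · simp [hc, this.mp hc]
      · have hc' : ¬ pvCell g' x y = "O" := fun h => hc (this.mpr h)
        simp [hc, hc']
    · simp [hb]

theorem pvReach_target {g : List (List String)} {n dx dy : Int} {f : Nat} {x y i j : Int}
    (h : pvReach g n dx dy f x y i j = true) :
    pvInb n i j ∧ pvCell g i j ≠ "O" := by
  induction f generalizing x y with
  | zero => simp [pvReach] at h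
  | succ f ih =>
    simp only [pvReach, Bool.and_eq_true, Bool.or_eq_true, decide_eq_true_eq] at h
    obtain ⟨⟨hb, hc⟩, h | h⟩ := h
    · obtain ⟨rfl, rfl⟩ := h; exact ⟨hb, hc⟩
    · exact ih h

theorem pvGInv_march {g : List (List String)} {N : Nat} {n dx dy : Int}
    (hg : pvGInv g N) (hn : n = (N : Int)) (f : Nat) (x y : Int) :
    pvGInv (pvMarch n dx dy f x y g) N := by
  induction f generalizing x y g with
  | zero => exact hg
  | succ f ih =>
    simp only [pvMarch]
    split
    · split
      · exact hg
      · rename_i hb _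
        exact ih (pvGInv_set hg hb.1 (by omega) _ _) _ _
    · exact hg

theorem pvCell_march {g : List (List String)} {N : Nat} {n dx dy : Int}
    (hg : pvGInv g N) (hn : n = (N : Int)) (f : Nat) (x y : Int) {i j : Int}
    (hi : 0 ≤ i) (hj : 0 ≤ j) :
    pvCell (pvMarch n dx dy f x y g) i j =
      if pvReach g n dx dy f x y i j then "T" else pvCell g i j := by
  induction f generalizing x y g with
  | zero => simp [pvMarch, pvReach]
  | succ f ih =>
    simp only [pvMarch, pvReach]
    by_cases hb : pvInb n x y
    · have hbx : (0 ≤ x ∧ x ≤ n-1 ∧ 0 ≤ y ∧ y ≤ n-1) := hb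
      rw [if_pos hbx]
      by_cases hc : pvCell g x y = "O"
      · simp [hc, hb]
      · rw [if_neg hc]
        have hg' : pvGInv (pvSet g x y "T") N := pvGInv_set hg hb.1 (by omega) _ _
        have hOiff : ∀ a b : Int, 0 ≤ a → 0 ≤ b →
            (pvCell (pvSet g x y "T") a b = "O" ↔ pvCell g a b = "O") := by
          intro a b ha hb'
          rw [pvCell_set hg hb.1 (by omega) hb.2.2.1 (by omega) ha hb']
          split
          · rename_i hab
            constructor
            · intro h; exact absurd h (by decide)
            · intro h; exact absurd (hab.1 ▸ hab.2 ▸ h) hc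
          · exact Iff.rfl
        rw [ih hg', pvReach_congr hOiff]
        rw [pvCell_set hg hb.1 (by omega) hb.2.2.1 (by omega) hi hj]
        by_cases hxy : x = i ∧ y = j
        · obtain ⟨rfl, rfl⟩ := hxy
          simp [hb, hc]
        · have hxy' : ¬ (i = x ∧ j = y) := fun h => hxy ⟨h.1.symm, h.2.symm⟩
          simp [hb, hc, hxy, hxy']
    · rw [if_neg (by exact hb)]
      simp [hb]

theorem pvReach_iff {g : List (List String)} {n dx dy : Int} (f : Nat) (x y i j : Int) :
    pvReach g n dx dy f x y i j = true ↔
      ∃ k : Nat, k < f ∧ i = x + (k : Int) * dx ∧ j = y + (k : Int) * dy ∧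
        ∀ m : Nat, m ≤ k →
          pvInb n (x + (m : Int) * dx) (y + (m : Int) * dy) ∧
          pvCell g (x + (m : Int) * dx) (y + (m : Int) * dy) ≠ "O" := by
  induction f generalizing x y with
  | zero => simp [pvReach]
  | succ f ih =>
    simp only [pvReach, Bool.and_eq_true, Bool.or_eq_true, decide_eq_true_eq, ih]
    constructor
    · rintro ⟨⟨hb, hc⟩, ⟨rfl, rfl⟩ | ⟨k, hk, hik, hjk, hcond⟩⟩
      · exact ⟨0, by omega, by simp, by simp, by
          intro m hm
          have : m = 0 := by omega
          subst this
          simpa using ⟨hb, hc⟩⟩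
      · refine ⟨k + 1, by omega, by push_cast [hik]; ring, by push_cast [hjk]; ring, ?_⟩
        intro m hm
        match m with
        | 0 => simpa using ⟨hb, hc⟩
        | m' + 1 =>
          have := hcond m' (by omega)
          constructor
          · have h1 := this.1
            simp only [pvInb] at h1 ⊢
            push_cast at h1 ⊢
            constructor; · linarith [h1.1]
            constructor; · linarith [h1.2.1]
            constructor; · linarith [h1.2.2.1]
            · linarith [h1.2.2.2]
          · have h2 := this.2
            have harg : x + ((m' : Int) + 1) * dx = x + dx + (m' : Int) * dx := by ring
            have harg2 : y + ((m' : Int) + 1) * dy = y + dy + (m' : Int) * dy := by ring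
            push_cast
            rw [harg, harg2]
            exact h2
    · rintro ⟨k, hk, hik, hjk, hcond⟩
      have h0 := hcond 0 (by omega)
      simp only [Nat.cast_zero, zero_mul, add_zero] at h0
      refine ⟨⟨h0.1, h0.2⟩, ?_⟩
      match k with
      | 0 =>
        left
        simp only [Nat.cast_zero, zero_mul, add_zero] at hik hjk
        exact ⟨hik.symm, hjk.symm⟩
      | k' + 1 =>
        right
        refine ⟨k', by omega, by push_cast at hik ⊢; linarith, by push_cast at hjk ⊢; linarith, ?_⟩
        intro m hm
        have := hcond (m + 1) (by omega)
        have harg : x + ((m : Int) + 1) * dx = x + dx + (m : Int) * dx := by ring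
        have harg2 : y + ((m : Int) + 1) * dy = y + dy + (m : Int) * dy := by ring
        push_cast at this
        rw [harg, harg2] at this
        exact this

def pvMoves : List (Int × Int) := [((-1 : Int), (0 : Int)), (1, 0), (0, -1), (0, 1)]

def pvLOS (g : List (List String)) (t1 t2 s1 s2 : Int) : Prop :=
  (t1 = s1 ∧ t2 ≠ s2 ∧ ∀ y, min t2 s2 < y → y < max t2 s2 → pvCell g t1 y ≠ "O") ∨
  (t2 = s2 ∧ t1 ≠ s1 ∧ ∀ x, min t1 s1 < x → x < max t1 s1 → pvCell g x t2 ≠ "O")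

theorem pvSees_iff {g : List (List String)} {n : Int} {t1 t2 s1 s2 : Int}
    (hnn : 0 ≤ n) (ht : pvInb n t1 t2) (hs : pvInb n s1 s2) (hsO : pvCell g s1 s2 ≠ "O") :
    (pvMoves.any (fun mv => pvReach g n mv.1 mv.2 n.toNat (t1 + mv.1) (t2 + mv.2) s1 s2)
      = true) ↔ pvLOS g t1 t2 s1 s2 := by
  have hfuel : ((n.toNat : Int)) = n := by omega
  simp only [pvMoves, List.any_cons, List.any_nil, Bool.or_eq_true, Bool.or_false,
    pvReach_iff]
  constructor
  · rintro (⟨k, hk, hik, hjk, hcond⟩ | ⟨k, hk, hik, hjk, hcond⟩ |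
            ⟨k, hk, hik, hjk, hcond⟩ | ⟨k, hk, hik, hjk, hcond⟩)
    -- (-1, 0)
    · simp only [mul_zero, add_zero, mul_neg, mul_one] at hik hjk
      right
      refine ⟨by omega, by omega, ?_⟩
      intro x hx1 hx2
      have hts : s1 < t1 := by omega
      rw [min_eq_right (by omega)] at hx1; rw [max_eq_left (by omega)] at hx2
      have hm := (hcond (t1 - 1 - x).toNat (by omega)).2
      have harg : t1 + -1 + (((t1 - 1 - x).toNat : Int)) * (-1) = x := by
        push_cast; omega
      have harg2 : t2 + 0 + (((t1 - 1 - x).toNat : Int)) * 0 = t2 := by ring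
      rw [show t1 + -1 + (((t1 - 1 - x).toNat : Int)) * -1 = x from harg] at hm
      rw [harg2] at hm
      exact fun h => hm h
    -- (1, 0)
    · simp only [mul_zero, add_zero, mul_one] at hik hjk
      right
      refine ⟨by omega, by omega, ?_⟩
      intro x hx1 hx2
      have hts : t1 < s1 := by omega
      rw [min_eq_left (by omega)] at hx1; rw [max_eq_right (by omega)] at hx2
      have hm := (hcond (x - t1 - 1).toNat (by omega)).2
      have harg : t1 + 1 + (((x - t1 - 1).toNat : Int)) * 1 = x := by push_cast; omega
      have harg2 : t2 + 0 + (((x - t1 - 1).toNat : Int)) * 0 = t2 := by ring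
      rw [harg, harg2] at hm
      exact fun h => hm h
    -- (0, -1)
    · simp only [mul_zero, add_zero, mul_neg, mul_one] at hik hjk
      left
      refine ⟨by omega, by omega, ?_⟩
      intro y hy1 hy2
      have hts : s2 < t2 := by omega
      rw [min_eq_right (by omega)] at hy1; rw [max_eq_left (by omega)] at hy2
      have hm := (hcond (t2 - 1 - y).toNat (by omega)).2
      have harg : t2 + -1 + (((t2 - 1 - y).toNat : Int)) * -1 = y := by push_cast; omega
      have harg2 : t1 + 0 + (((t2 - 1 - y).toNat : Int)) * 0 = t1 := by ring
      rw [harg, harg2] at hm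
      exact hm
    -- (0, 1)
    · simp only [mul_zero, add_zero, mul_one] at hik hjk
      left
      refine ⟨by omega, by omega, ?_⟩
      intro y hy1 hy2
      have hts : t2 < s2 := by omega
      rw [min_eq_left (by omega)] at hy1; rw [max_eq_right (by omega)] at hy2
      have hm := (hcond (y - t2 - 1).toNat (by omega)).2
      have harg : t2 + 1 + (((y - t2 - 1).toNat : Int)) * 1 = y := by push_cast; omega
      have harg2 : t1 + 0 + (((y - t2 - 1).toNat : Int)) * 0 = t1 := by ring
      rw [harg, harg2] at hm
      exact hm
  · rintro (⟨hrow, hne, hclear⟩ | ⟨hcol, hne, hclear⟩)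
    · rcases lt_or_gt_of_ne hne with hlt | hgt
      -- t2 < s2 : move (0, 1)
      · refine Or.inr (Or.inr (Or.inr ⟨(s2 - t2 - 1).toNat, by omega, by
          push_cast; omega, by push_cast; omega, ?_⟩))
        intro m hm
        have hpos : t2 + 1 + (m : Int) * 1 ≤ s2 := by push_cast at hm ⊢; omega
        constructor
        · simp only [pvInb]; push_cast; omega
        · have harg2 : t1 + 0 + (m : Int) * 0 = t1 := by ring
          rw [harg2]
          by_cases hend : t2 + 1 + (m : Int) * 1 = s2
          · rw [hend, hrow]; exact hsO
          · exact hclear _ (by rw [min_eq_left (by omega)]; omega)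
              (by rw [max_eq_right (by omega)]; omega)
      -- s2 < t2 : move (0, -1)
      · refine Or.inr (Or.inr (Or.inl ⟨(t2 - 1 - s2).toNat, by omega, by
          push_cast; omega, by push_cast; omega, ?_⟩))
        intro m hm
        have hpos : s2 ≤ t2 + -1 + (m : Int) * (-1) := by push_cast at hm ⊢; omega
        constructor
        · simp only [pvInb]; push_cast; omega
        · have harg2 : t1 + 0 + (m : Int) * 0 = t1 := by ring
          rw [harg2]
          by_cases hend : t2 + -1 + (m : Int) * (-1) = s2
          · rw [hend, hrow]; exact hsO
          · exact hclear _ (by rw [min_eq_right (by omega)]; omega)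
              (by rw [max_eq_left (by omega)]; omega)
    · rcases lt_or_gt_of_ne hne with hlt | hgt
      -- t1 < s1 : move (1, 0)
      · refine Or.inr (Or.inl ⟨(s1 - t1 - 1).toNat, by omega, by
          push_cast; omega, by push_cast; omega, ?_⟩)
        intro m hm
        have hpos : t1 + 1 + (m : Int) * 1 ≤ s1 := by push_cast at hm ⊢; omega
        constructor
        · simp only [pvInb]; push_cast; omega
        · have harg2 : t2 + 0 + (m : Int) * 0 = t2 := by ring
          rw [harg2]
          by_cases hend : t1 + 1 + (m : Int) * 1 = s1
          · rw [hend, hcol]; exact hsO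
          · exact hclear _ (by rw [min_eq_left (by omega)]; omega)
              (by rw [max_eq_right (by omega)]; omega)
      -- s1 < t1 : move (-1, 0)
      · refine Or.inl ⟨(t1 - 1 - s1).toNat, by omega, by
          push_cast; omega, by push_cast; omega, ?_⟩
        intro m hm
        have hpos : s1 ≤ t1 + -1 + (m : Int) * (-1) := by push_cast at hm ⊢; omega
        constructor
        · simp only [pvInb]; push_cast; omega
        · have harg2 : t2 + 0 + (m : Int) * 0 = t2 := by ring
          rw [harg2]
          by_cases hend : t1 + -1 + (m : Int) * (-1) = s1
          · rw [hend, hcol]; exact hsO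
          · exact hclear _ (by rw [min_eq_right (by omega)]; omega)
              (by rw [max_eq_left (by omega)]; omega)

def pvSeesT (g : List (List String)) (n : Int) (t : Int × Int) (i j : Int) : Bool :=
  pvMoves.any (fun mv => pvReach g n mv.1 mv.2 n.toNat (t.1 + mv.1) (t.2 + mv.2) i j)

theorem pvSeesT_congr {g g' : List (List String)} {n : Int}
    (hO : ∀ a b : Int, 0 ≤ a → 0 ≤ b → (pvCell g a b = "O" ↔ pvCell g' a b = "O"))
    (t : Int × Int) (i j : Int) :
    pvSeesT g n t i j = pvSeesT g' n t i j := by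
  simp only [pvSeesT, pvMoves, List.any_cons, List.any_nil, pvReach_congr hO]

theorem pvSeesT_target {g : List (List String)} {n : Int} {t : Int × Int} {i j : Int}
    (h : pvSeesT g n t i j = true) : pvInb n i j ∧ pvCell g i j ≠ "O" := by
  simp only [pvSeesT, List.any_eq_true] at h
  obtain ⟨mv, _, hr⟩ := h
  exact pvReach_target hr

theorem pvO_march {g : List (List String)} {N : Nat} {n dx dy : Int}
    (hg : pvGInv g N) (hn : n = (N : Int)) (f : Nat) (x y : Int) {a b : Int}
    (ha : 0 ≤ a) (hb : 0 ≤ b) :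
    (pvCell (pvMarch n dx dy f x y g) a b = "O") ↔ pvCell g a b = "O" := by
  rw [pvCell_march hg hn f x y ha hb]
  split
  · rename_i hr
    have := (pvReach_target hr).2
    constructor
    · intro h; exact absurd h (by decide)
    · intro h; exact absurd h this
  · exact Iff.rfl

theorem pvGInv_contam {g : List (List String)} {N : Nat} (hg : pvGInv g N) (t : Int × Int) :
    pvGInv (pvContamination g t) N := by
  have hn : ((g.length : Nat) : Int) = (N : Int) := by rw [hg.1]
  simp only [pvContamination, List.foldl_cons, List.foldl_nil]
  exact pvGInv_march (pvGInv_march (pvGInv_march (pvGInv_march hg hn _ _ _) hn _ _ _) hn _ _ _) hn _ _ _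

theorem pvCell_contam {g : List (List String)} {N : Nat} (hg : pvGInv g N) (t : Int × Int)
    {i j : Int} (hi : 0 ≤ i) (hj : 0 ≤ j) :
    pvCell (pvContamination g t) i j =
      if pvSeesT g (N : Int) t i j then "T" else pvCell g i j := by
  have hn : ((g.length : Nat) : Int) = (N : Int) := by rw [hg.1]
  simp only [pvContamination, List.foldl_cons, List.foldl_nil]
  have hg1 : pvGInv (pvMarch (g.length : Int) (-1) 0 (g.length : Int).toNat (t.1 + -1) (t.2 + 0) g) N :=
    pvGInv_march hg hn _ _ _
  have hg2 : pvGInv (pvMarch (g.length : Int) 1 0 (g.length : Int).toNat (t.1 + 1) (t.2 + 0) _) N :=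
    pvGInv_march hg1 hn _ _ _
  have hg3 : pvGInv (pvMarch (g.length : Int) 0 (-1) (g.length : Int).toNat (t.1 + 0) (t.2 + -1) _) N :=
    pvGInv_march hg2 hn _ _ _
  have hO1 : ∀ a b : Int, 0 ≤ a → 0 ≤ b → (pvCell (pvMarch ((g.length : Nat) : Int) (-1) 0 ((g.length : Nat) : Int).toNat (t.1 + -1) (t.2 + 0) g) a b = "O" ↔ pvCell g a b = "O") :=
    fun a b ha hb => pvO_march hg hn _ _ _ ha hb
  have hO2 : ∀ a b : Int, 0 ≤ a → 0 ≤ b → (pvCell (pvMarch ((g.length : Nat) : Int) 1 0 ((g.length : Nat) : Int).toNat (t.1 + 1) (t.2 + 0) (pvMarch ((g.length : Nat) : Int) (-1) 0 ((g.length : Nat) : Int).toNat (t.1 + -1) (t.2 + 0) g)) a b = "O" ↔ pvCell g a b = "O") :=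
    fun a b ha hb => (pvO_march hg1 hn _ _ _ ha hb).trans (hO1 a b ha hb)
  have hO3 : ∀ a b : Int, 0 ≤ a → 0 ≤ b → (pvCell (pvMarch ((g.length : Nat) : Int) 0 (-1) ((g.length : Nat) : Int).toNat (t.1 + 0) (t.2 + -1) (pvMarch ((g.length : Nat) : Int) 1 0 ((g.length : Nat) : Int).toNat (t.1 + 1) (t.2 + 0) (pvMarch ((g.length : Nat) : Int) (-1) 0 ((g.length : Nat) : Int).toNat (t.1 + -1) (t.2 + 0) g))) a b = "O" ↔ pvCell g a b = "O") :=
    fun a b ha hb => (pvO_march hg2 hn _ _ _ ha hb).trans (hO2 a b ha hb)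
  rw [pvCell_march hg3 hn _ _ _ hi hj, pvCell_march hg2 hn _ _ _ hi hj,
      pvCell_march hg1 hn _ _ _ hi hj, pvCell_march hg hn _ _ _ hi hj]
  rw [pvReach_congr hO3, pvReach_congr hO2, pvReach_congr hO1]
  simp only [pvSeesT, pvMoves, List.any_cons, List.any_nil, Bool.or_false, hn]
  simp only [add_zero, Int.toNat_natCast]
  by_cases h1 : pvReach g (N:Int) (-1) 0 N (t.1 + -1) t.2 i j = true
  all_goals by_cases h2 : pvReach g (N:Int) 1 0 N (t.1 + 1) t.2 i j = true
  all_goals by_cases h3 : pvReach g (N:Int) 0 (-1) N t.1 (t.2 + -1) i j = true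
  all_goals by_cases h4 : pvReach g (N:Int) 0 1 N t.1 (t.2 + 1) i j = true
  all_goals simp [h1, h2, h3, h4]

theorem pvO_contam {g : List (List String)} {N : Nat} (hg : pvGInv g N) (t : Int × Int)
    {a b : Int} (ha : 0 ≤ a) (hb : 0 ≤ b) :
    (pvCell (pvContamination g t) a b = "O") ↔ pvCell g a b = "O" := by
  rw [pvCell_contam hg t ha hb]
  split
  · rename_i hr
    have := (pvSeesT_target hr).2
    exact ⟨fun h => absurd h (by decide), fun h => absurd h this⟩
  · exact Iff.rfl

theorem pvCell_teachfold {g : List (List String)} {N : Nat} (hg : pvGInv g N)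
    (ts : List (Int × Int)) {i j : Int} (hi : 0 ≤ i) (hj : 0 ≤ j) :
    pvGInv (ts.foldl pvContamination g) N ∧
    (∀ a b : Int, 0 ≤ a → 0 ≤ b →
      ((pvCell (ts.foldl pvContamination g) a b = "O") ↔ pvCell g a b = "O")) ∧
    pvCell (ts.foldl pvContamination g) i j =
      if ts.any (fun t => pvSeesT g (N : Int) t i j) then "T" else pvCell g i j := by
  induction ts generalizing g with
  | nil => exact ⟨hg, fun a b _ _ => Iff.rfl, by simp⟩
  | cons t ts ih =>
    have hg1 := pvGInv_contam hg t
    obtain ⟨hI, hOf, hc⟩ := ih hg1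
    refine ⟨hI, ?_, ?_⟩
    · intro a b ha hb
      exact (hOf a b ha hb).trans (pvO_contam hg t ha hb)
    · rw [List.foldl_cons, hc]
      have hOc : ∀ a b : Int, 0 ≤ a → 0 ≤ b →
          (pvCell (pvContamination g t) a b = "O" ↔ pvCell g a b = "O") :=
        fun a b ha hb => pvO_contam hg t ha hb
      simp only [List.any_cons, Bool.or_eq_true]
      rw [pvCell_contam hg t hi hj]
      have hcongr : ∀ t' : Int × Int,
          pvSeesT (pvContamination g t) (N : Int) t' i j = pvSeesT g (N : Int) t' i j :=
        fun t' => pvSeesT_congr hOc t' i j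
      by_cases hs : pvSeesT g (N : Int) t i j = true
      · simp only [hcongr, hs]
        by_cases hany : ts.any (fun t => pvSeesT g (N : Int) t i j) = true
        · simp [hany]
        · simp [hany]
      · simp only [hcongr]
        by_cases hany : ts.any (fun t => pvSeesT g (N : Int) t i j) = true
        · simp [hany, hs]
        · simp [hany, hs]

def pvCells (array : List (List String)) (v : String) : List (Int × Int) :=
  let n : Int := array.length
  (PySem.List.pyRange 0 n 1).flatMap (fun i =>
    (PySem.List.pyRange 0 n 1).flatMap (fun j =>
      if pvCell array i j = v then [(i, j)] else []))

theorem pvFoldl_congr {α β : Type} (f g : α → β → α) (h : ∀ a b, f a b = g a b)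
    (l : List β) (a : α) : l.foldl f a = l.foldl g a := by
  induction l generalizing a with
  | nil => rfl
  | cons x xs ih => simp only [List.foldl_cons, h, ih]

theorem pvFold_gather (array : List (List String)) (v : String) :
    (PySem.List.pyRange 0 (array.length : Int) 1).foldl (fun acc i =>
      (PySem.List.pyRange 0 (array.length : Int) 1).foldl
        (fun acc j => if pvCell array i j = v then acc ++ [(i, j)] else acc) acc) []
    = pvCells array v := by
  have hstep : ∀ i : Int,
      (fun (acc : List (Int × Int)) (j : Int) =>
        if pvCell array i j = v then acc ++ [(i, j)] else acc)
      = fun acc j => acc ++ (if pvCell array i j = v then [(i, j)] else []) := by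
    intro i; funext acc j; split <;> simp
  have hinner : ∀ (i : Int) (acc : List (Int × Int)),
      (PySem.List.pyRange 0 (array.length : Int) 1).foldl
        (fun acc j => if pvCell array i j = v then acc ++ [(i, j)] else acc) acc
      = acc ++ (PySem.List.pyRange 0 (array.length : Int) 1).flatMap
          (fun j => if pvCell array i j = v then [(i, j)] else []) := by
    intro i acc
    rw [hstep i, PySem.List.foldl_append_eq_flatMap]
  calc (PySem.List.pyRange 0 (array.length : Int) 1).foldl (fun acc i =>
      (PySem.List.pyRange 0 (array.length : Int) 1).foldl
        (fun acc j => if pvCell array i j = v then acc ++ [(i, j)] else acc) acc) []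
      = (PySem.List.pyRange 0 (array.length : Int) 1).foldl (fun acc i =>
          acc ++ (PySem.List.pyRange 0 (array.length : Int) 1).flatMap
            (fun j => if pvCell array i j = v then [(i, j)] else [])) [] := by
        exact pvFoldl_congr _ _ (fun a b => hinner b a) _ _
    _ = pvCells array v := by
        rw [PySem.List.foldl_append_eq_flatMap]
        simp [pvCells]

theorem pvMem_cells {array : List (List String)} {v : String} {p : Int × Int} :
    p ∈ pvCells array v ↔
      0 ≤ p.1 ∧ p.1 < (array.length : Int) ∧ 0 ≤ p.2 ∧ p.2 < (array.length : Int) ∧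
        pvCell array p.1 p.2 = v := by
  simp only [pvCells, List.mem_flatMap, PySem.List.mem_pyRange_one]
  constructor
  · rintro ⟨i, ⟨hi0, hin⟩, j, ⟨hj0, hjn⟩, hp⟩
    split at hp
    · rename_i hc
      simp at hp
      obtain ⟨rfl, rfl⟩ := hp
      exact ⟨hi0, hin, hj0, hjn, hc⟩
    · simp at hp
  · rintro ⟨h1, h2, h3, h4, h5⟩
    exact ⟨p.1, ⟨h1, h2⟩, p.2, ⟨h3, h4⟩, by simp [h5]⟩

theorem pvFoldl_prod3 {β σ1 σ2 σ3 : Type} (f : σ1 → β → σ1) (g : σ2 → β → σ2)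
    (h : σ3 → β → σ3) (l : List β) (a : σ1) (b : σ2) (c : σ3) :
    l.foldl (fun s e => (f s.1 e, g s.2.1 e, h s.2.2 e)) (a, b, c)
      = (l.foldl f a, l.foldl g b, l.foldl h c) := by
  induction l generalizing a b c with
  | nil => rfl
  | cons x xs ih => simp only [List.foldl_cons, ih]

theorem pvFoldl_prod4 {β σ1 σ2 σ3 σ4 : Type} (f : σ1 → β → σ1) (g : σ2 → β → σ2)
    (h : σ3 → β → σ3) (k : σ4 → β → σ4) (l : List β) (a : σ1) (b : σ2) (c : σ3) (d : σ4) :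
    l.foldl (fun s e => (f s.1 e, g s.2.1 e, h s.2.2.1 e, k s.2.2.2 e)) (a, b, c, d)
      = (l.foldl f a, l.foldl g b, l.foldl h c, l.foldl k d) := by
  induction l generalizing a b c d with
  | nil => rfl
  | cons x xs ih => simp only [List.foldl_cons, ih]

theorem pvScanA_eq (array : List (List String)) :
    pvScanA array = (pvCells array "T", pvCells array "X", pvCells array "S") := by
  unfold pvScanA
  rw [← pvFold_gather array "T", ← pvFold_gather array "X", ← pvFold_gather array "S"]
  have hstep : ∀ (i : Int)
      (acc : List (Int × Int) × List (Int × Int) × List (Int × Int)) (j : Int),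
      (let acc1 := if pvCell array i j = "T" then (acc.1 ++ [(i,j)], acc.2.1, acc.2.2) else acc
       let acc2 := if pvCell array i j = "X" then (acc1.1, acc1.2.1 ++ [(i,j)], acc1.2.2) else acc1
       if pvCell array i j = "S" then (acc2.1, acc2.2.1, acc2.2.2 ++ [(i,j)]) else acc2)
      = ((if pvCell array i j = "T" then acc.1 ++ [(i,j)] else acc.1),
         (if pvCell array i j = "X" then acc.2.1 ++ [(i,j)] else acc.2.1),
         (if pvCell array i j = "S" then acc.2.2 ++ [(i,j)] else acc.2.2)) := by
    intro i acc j
    split_ifs <;> rfl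
  have hinner : ∀ (i : Int)
      (acc : List (Int × Int) × List (Int × Int) × List (Int × Int)),
      (PySem.List.pyRange 0 (array.length : Int) 1).foldl (fun acc j =>
        let acc1 := if pvCell array i j = "T" then (acc.1 ++ [(i,j)], acc.2.1, acc.2.2) else acc
        let acc2 := if pvCell array i j = "X" then (acc1.1, acc1.2.1 ++ [(i,j)], acc1.2.2) else acc1
        if pvCell array i j = "S" then (acc2.1, acc2.2.1, acc2.2.2 ++ [(i,j)]) else acc2) acc
      = ((PySem.List.pyRange 0 (array.length : Int) 1).foldl
           (fun a j => if pvCell array i j = "T" then a ++ [(i,j)] else a) acc.1,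
         (PySem.List.pyRange 0 (array.length : Int) 1).foldl
           (fun a j => if pvCell array i j = "X" then a ++ [(i,j)] else a) acc.2.1,
         (PySem.List.pyRange 0 (array.length : Int) 1).foldl
           (fun a j => if pvCell array i j = "S" then a ++ [(i,j)] else a) acc.2.2) := by
    intro i acc
    obtain ⟨a1, a2, a3⟩ := acc
    rw [pvFoldl_congr _ _ (hstep i)]
    exact pvFoldl_prod3 (fun a j => if pvCell array i j = "T" then a ++ [(i,j)] else a)
      (fun a j => if pvCell array i j = "X" then a ++ [(i,j)] else a)
      (fun a j => if pvCell array i j = "S" then a ++ [(i,j)] else a) _ a1 a2 a3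
  rw [pvFoldl_congr _ _ (fun acc i => hinner i acc)]
  exact pvFoldl_prod3
    (fun a i => (PySem.List.pyRange 0 (array.length : Int) 1).foldl
      (fun a j => if pvCell array i j = "T" then a ++ [(i,j)] else a) a)
    (fun a i => (PySem.List.pyRange 0 (array.length : Int) 1).foldl
      (fun a j => if pvCell array i j = "X" then a ++ [(i,j)] else a) a)
    (fun a i => (PySem.List.pyRange 0 (array.length : Int) 1).foldl
      (fun a j => if pvCell array i j = "S" then a ++ [(i,j)] else a) a) _ [] [] []

def pvBlockedFold (array : List (List String)) : PySem.Set (Int × Int) :=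
  (PySem.List.pyRange 0 (array.length : Int) 1).foldl (fun acc i =>
    (PySem.List.pyRange 0 (array.length : Int) 1).foldl
      (fun acc j => if pvCell array i j = "O" then PySem.Set.add acc (i,j) else acc) acc)
    PySem.Set.empty

theorem pvScanB_eq (array : List (List String)) :
    pvScanB array = (pvCells array "T", pvCells array "S", pvCells array "X",
      pvBlockedFold array) := by
  unfold pvScanB pvBlockedFold
  rw [← pvFold_gather array "T", ← pvFold_gather array "S", ← pvFold_gather array "X"]
  have hstep : ∀ (i : Int)
      (acc : List (Int × Int) × List (Int × Int) × List (Int × Int) × PySem.Set (Int × Int))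
      (j : Int),
      ((fun acc (j : Int) =>
        let c := pvCell array i j
        if c = "T" then (acc.1 ++ [(i,j)], acc.2.1, acc.2.2.1, acc.2.2.2)
        else if c = "S" then (acc.1, acc.2.1 ++ [(i,j)], acc.2.2.1, acc.2.2.2)
        else if c = "X" then (acc.1, acc.2.1, acc.2.2.1 ++ [(i,j)], acc.2.2.2)
        else if c = "O" then (acc.1, acc.2.1, acc.2.2.1, PySem.Set.add acc.2.2.2 (i,j))
        else acc) acc j)
      = ((if pvCell array i j = "T" then acc.1 ++ [(i,j)] else acc.1),
         (if pvCell array i j = "S" then acc.2.1 ++ [(i,j)] else acc.2.1),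
         (if pvCell array i j = "X" then acc.2.2.1 ++ [(i,j)] else acc.2.2.1),
         (if pvCell array i j = "O" then PySem.Set.add acc.2.2.2 (i,j) else acc.2.2.2)) := by
    intro i acc j
    simp only []
    split_ifs <;> first | rfl | simp_all
  have hinner : ∀ (i : Int)
      (acc : List (Int × Int) × List (Int × Int) × List (Int × Int) × PySem.Set (Int × Int)),
      (PySem.List.pyRange 0 (array.length : Int) 1).foldl (fun acc j =>
        let c := pvCell array i j
        if c = "T" then (acc.1 ++ [(i,j)], acc.2.1, acc.2.2.1, acc.2.2.2)
        else if c = "S" then (acc.1, acc.2.1 ++ [(i,j)], acc.2.2.1, acc.2.2.2)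
        else if c = "X" then (acc.1, acc.2.1, acc.2.2.1 ++ [(i,j)], acc.2.2.2)
        else if c = "O" then (acc.1, acc.2.1, acc.2.2.1, PySem.Set.add acc.2.2.2 (i,j))
        else acc) acc
      = ((PySem.List.pyRange 0 (array.length : Int) 1).foldl
           (fun a j => if pvCell array i j = "T" then a ++ [(i,j)] else a) acc.1,
         (PySem.List.pyRange 0 (array.length : Int) 1).foldl
           (fun a j => if pvCell array i j = "S" then a ++ [(i,j)] else a) acc.2.1,
         (PySem.List.pyRange 0 (array.length : Int) 1).foldl
           (fun a j => if pvCell array i j = "X" then a ++ [(i,j)] else a) acc.2.2.1,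
         (PySem.List.pyRange 0 (array.length : Int) 1).foldl
           (fun a j => if pvCell array i j = "O" then PySem.Set.add a (i,j) else a) acc.2.2.2) := by
    intro i acc
    obtain ⟨a1, a2, a3, a4⟩ := acc
    rw [pvFoldl_congr _ _ (hstep i)]
    exact pvFoldl_prod4 (fun a j => if pvCell array i j = "T" then a ++ [(i,j)] else a)
      (fun a j => if pvCell array i j = "S" then a ++ [(i,j)] else a)
      (fun a j => if pvCell array i j = "X" then a ++ [(i,j)] else a)
      (fun a j => if pvCell array i j = "O" then PySem.Set.add a (i,j) else a) _ a1 a2 a3 a4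
  rw [pvFoldl_congr _ _ (fun acc i => hinner i acc)]
  exact pvFoldl_prod4
    (fun a i => (PySem.List.pyRange 0 (array.length : Int) 1).foldl
      (fun a j => if pvCell array i j = "T" then a ++ [(i,j)] else a) a)
    (fun a i => (PySem.List.pyRange 0 (array.length : Int) 1).foldl
      (fun a j => if pvCell array i j = "S" then a ++ [(i,j)] else a) a)
    (fun a i => (PySem.List.pyRange 0 (array.length : Int) 1).foldl
      (fun a j => if pvCell array i j = "X" then a ++ [(i,j)] else a) a)
    (fun a i => (PySem.List.pyRange 0 (array.length : Int) 1).foldl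
      (fun a j => if pvCell array i j = "O" then PySem.Set.add a (i,j) else a) a) _ [] [] [] []

theorem pvMem_foldl {β γ : Type} (step : List γ → β → List γ) (Q : β → γ → Prop)
    (h : ∀ s b x, x ∈ step s b ↔ x ∈ s ∨ Q b x) (l : List β) (s0 : List γ) (x : γ) :
    x ∈ l.foldl step s0 ↔ x ∈ s0 ∨ ∃ b ∈ l, Q b x := by
  induction l generalizing s0 with
  | nil => simp
  | cons b bs ih =>
    rw [List.foldl_cons, ih, h]
    constructor
    · rintro (( hx | hq) | ⟨b', hb', hq⟩)
      · exact Or.inl hx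
      · exact Or.inr ⟨b, List.mem_cons_self, hq⟩
      · exact Or.inr ⟨b', List.mem_cons_of_mem _ hb', hq⟩
    · rintro (hx | ⟨b', hb', hq⟩)
      · exact Or.inl (Or.inl hx)
      · rcases List.mem_cons.mp hb' with rfl | hb'
        · exact Or.inl (Or.inr hq)
        · exact Or.inr ⟨b', hb', hq⟩

theorem pvMem_blocked {array : List (List String)} {p : Int × Int} :
    p ∈ pvBlockedFold array ↔
      0 ≤ p.1 ∧ p.1 < (array.length : Int) ∧ 0 ≤ p.2 ∧ p.2 < (array.length : Int) ∧
        pvCell array p.1 p.2 = "O" := by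
  unfold pvBlockedFold
  rw [pvMem_foldl _ (fun i x => ∃ j ∈ PySem.List.pyRange 0 (array.length : Int) 1,
        pvCell array i j = "O" ∧ x = (i, j)) ?hstep]
  case hstep =>
    intro s i x
    rw [pvMem_foldl _ (fun j y => pvCell array i j = "O" ∧ y = (i, j)) ?inner]
    case inner =>
      intro s' j y
      split
      · rename_i hc
        rw [PySem.Set.mem_add]
        constructor
        · rintro (hy | rfl)
          · exact Or.inl hy
          · exact Or.inr ⟨hc, rfl⟩
        · rintro (hy | ⟨_, rfl⟩)
          · exact Or.inl hy
          · exact Or.inr rfl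
      · rename_i hnc
        constructor
        · exact Or.inl
        · rintro (hy | ⟨hc, _⟩)
          · exact hy
          · exact absurd hc hnc
  simp only [PySem.Set.empty, List.not_mem_nil, false_or, PySem.List.mem_pyRange_one]
  constructor
  · rintro ⟨i, ⟨hi0, hin⟩, j, ⟨hj0, hjn⟩, hc, rfl⟩
    exact ⟨hi0, hin, hj0, hjn, hc⟩
  · rintro ⟨h1, h2, h3, h4, h5⟩
    exact ⟨p.1, ⟨h1, h2⟩, p.2, ⟨h3, h4⟩, h5, rfl⟩

theorem pvMem_comb2 {α : Type} [Inhabited α] (l : List α) (p : α × α) :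
    p ∈ pvComb2 l ↔ ∃ i j : Nat, i < j ∧ j < l.length ∧
      p = (l.getD i default, l.getD j default) := by
  induction l with
  | nil => simp [pvComb2]
  | cons x xs ih =>
    simp only [pvComb2, List.mem_append, List.mem_map, ih]
    constructor
    · rintro (⟨y, hy, rfl⟩ | ⟨i, j, hij, hjl, rfl⟩)
      · obtain ⟨j, hj, rfl⟩ := List.getElem_of_mem hy
        exact ⟨0, j + 1, by omega, by simp; omega, by
          simp [List.getD_cons_succ, List.getD_eq_getElem?_getD, List.getElem?_eq_getElem hj]⟩
      · exact ⟨i + 1, j + 1, by omega, by simp; omega, by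
          simp [List.getD_cons_succ]⟩
    · rintro ⟨i, j, hij, hjl, rfl⟩
      match i, j with
      | 0, j + 1 =>
        left
        have hj : j < xs.length := by simp at hjl; omega
        refine ⟨xs.getD j default, ?_, by simp [List.getD_cons_succ]⟩
        rw [List.getD_eq_getElem?_getD, List.getElem?_eq_getElem hj]
        exact List.getElem_mem hj
      | i + 1, j + 1 =>
        right
        exact ⟨i, j, by omega, by simp at hjl; omega, by simp [List.getD_cons_succ]⟩

theorem pvMem_comb3 {α : Type} [Inhabited α] (l : List α) (p : α × α × α) :
    p ∈ pvComb3 l ↔ ∃ i j k : Nat, i < j ∧ j < k ∧ k < l.length ∧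
      p = (l.getD i default, l.getD j default, l.getD k default) := by
  induction l with
  | nil => simp [pvComb3]
  | cons x xs ih =>
    simp only [pvComb3, List.mem_append, List.mem_map, ih]
    constructor
    · rintro (⟨q, hq, rfl⟩ | ⟨i, j, k, hij, hjk, hkl, rfl⟩)
      · rw [pvMem_comb2] at hq
        obtain ⟨i, j, hij, hjl, rfl⟩ := hq
        exact ⟨0, i + 1, j + 1, by omega, by omega, by simp; omega, by
          simp [List.getD_cons_succ]⟩
      · exact ⟨i + 1, j + 1, k + 1, by omega, by omega, by simp; omega, by
          simp [List.getD_cons_succ]⟩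
    · rintro ⟨i, j, k, hij, hjk, hkl, rfl⟩
      match i, j, k with
      | 0, j + 1, k + 1 =>
        left
        refine ⟨(xs.getD j default, xs.getD k default), ?_, by simp [List.getD_cons_succ]⟩
        rw [pvMem_comb2]
        exact ⟨j, k, by omega, by simp at hkl; omega, rfl⟩
      | i + 1, j + 1, k + 1 =>
        right
        exact ⟨i, j, k, by omega, by omega, by simp at hkl; omega, by
          simp [List.getD_cons_succ]⟩

theorem pvALoop_eq_any (array : List (List String)) (ts ss : List (Int × Int))
    (l : List ((Int × Int) × (Int × Int) × (Int × Int))) :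
    pvALoop array ts ss l = l.any (pvRunCombo array ts ss) := by
  induction l with
  | nil => rfl
  | cons c rest ih =>
    simp only [pvALoop, List.any_cons, ih]
    by_cases h : pvRunCombo array ts ss c = true
    · simp [h]
    · simp [h]

theorem pvClearRow_iff {g1 : List (List String)} {n : Int} {block : PySem.Set (Int × Int)}
    (hB : ∀ a b : Int, 0 ≤ a → a < n → 0 ≤ b → b < n →
      ((a, b) ∈ block ↔ pvCell g1 a b = "O"))
    {a lo hi : Int} (ha1 : 0 ≤ a) (ha2 : a < n) (hlo : 0 ≤ lo) (hhi : hi < n) :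
    (∀ y : Int, lo + 1 ≤ y → y < hi → (a, y) ∉ block) ↔
    (∀ y : Int, lo < y → y < hi → pvCell g1 a y ≠ "O") := by
  constructor
  · intro h y h1 h2
    have := h y (by omega) h2
    rw [hB a y ha1 ha2 (by omega) (by omega)] at this
    exact this
  · intro h y h1 h2
    rw [hB a y ha1 ha2 (by omega) (by omega)]
    exact h y (by omega) h2

theorem pvClearCol_iff {g1 : List (List String)} {n : Int} {block : PySem.Set (Int × Int)}
    (hB : ∀ a b : Int, 0 ≤ a → a < n → 0 ≤ b → b < n →
      ((a, b) ∈ block ↔ pvCell g1 a b = "O"))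
    {a lo hi : Int} (ha1 : 0 ≤ a) (ha2 : a < n) (hlo : 0 ≤ lo) (hhi : hi < n) :
    (∀ x : Int, lo + 1 ≤ x → x < hi → (x, a) ∉ block) ↔
    (∀ x : Int, lo < x → x < hi → pvCell g1 x a ≠ "O") := by
  constructor
  · intro h x h1 h2
    have := h x (by omega) h2
    rw [hB x a (by omega) (by omega) ha1 ha2] at this
    exact this
  · intro h x h1 h2
    rw [hB x a (by omega) (by omega) ha1 ha2]
    exact h x (by omega) h2

theorem pvSees_port_iff {g1 : List (List String)} {n : Int} {block : PySem.Set (Int × Int)}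
    {t s : Int × Int}
    (ht1 : 0 ≤ t.1) (ht2 : t.1 < n) (ht3 : 0 ≤ t.2) (ht4 : t.2 < n)
    (hs1 : 0 ≤ s.1) (hs2 : s.1 < n) (hs3 : 0 ≤ s.2) (hs4 : s.2 < n)
    (hB : ∀ a b : Int, 0 ≤ a → a < n → 0 ≤ b → b < n →
      ((a, b) ∈ block ↔ pvCell g1 a b = "O")) :
    pvSees block t s = true ↔ pvLOS g1 t.1 t.2 s.1 s.2 := by
  unfold pvSees pvLOS
  by_cases hrow : s.1 = t.1 ∧ s.2 ≠ t.2
  · rw [if_pos hrow]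
    have hcol : ¬ (t.2 = s.2 ∧ t.1 ≠ s.1) := fun h => hrow.2 h.1.symm
    simp only [List.all_eq_true, PySem.List.mem_pyRange_one, Bool.not_eq_eq_eq_not,
      Bool.not_true, and_imp]
    have hnotmem : ∀ q : Int × Int, (PySem.Set.contains block q = false) ↔ q ∉ block := by
      intro q
      rw [← PySem.Set.contains_iff]
      simp
    by_cases hlt : s.2 < t.2
    · simp only [if_pos hlt]
      constructor
      · intro h
        refine Or.inl ⟨hrow.1.symm, fun he => hrow.2 he.symm, ?_⟩
        rw [min_eq_right (le_of_lt hlt), max_eq_left (le_of_lt hlt), ← hrow.1]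
        exact (pvClearRow_iff hB hs1 hs2 hs3 ht4).mp
          (fun y h1 h2 => (hnotmem _).mp (h y h1 h2))
      · rintro (⟨_, _, hclear⟩ | ⟨he, _, _⟩)
        · rw [min_eq_right (le_of_lt hlt), max_eq_left (le_of_lt hlt), ← hrow.1] at hclear
          intro y h1 h2
          exact (hnotmem _).mpr ((pvClearRow_iff hB hs1 hs2 hs3 ht4).mpr hclear y h1 h2)
        · exact absurd he.symm hrow.2
    · have hlt' : t.2 < s.2 := by omega
      simp only [if_neg hlt]
      constructor
      · intro h
        refine Or.inl ⟨hrow.1.symm, fun he => hrow.2 he.symm, ?_⟩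
        rw [min_eq_left (le_of_lt hlt'), max_eq_right (le_of_lt hlt'), ← hrow.1]
        exact (pvClearRow_iff hB hs1 hs2 ht3 hs4).mp
          (fun y h1 h2 => (hnotmem _).mp (h y h1 h2))
      · rintro (⟨_, _, hclear⟩ | ⟨he, _, _⟩)
        · rw [min_eq_left (le_of_lt hlt'), max_eq_right (le_of_lt hlt'), ← hrow.1] at hclear
          intro y h1 h2
          exact (hnotmem _).mpr ((pvClearRow_iff hB hs1 hs2 ht3 hs4).mpr hclear y h1 h2)
        · exact absurd he.symm hrow.2
  · rw [if_neg hrow]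
    by_cases hcol : s.2 = t.2 ∧ s.1 ≠ t.1
    · rw [if_pos hcol]
      simp only [List.all_eq_true, PySem.List.mem_pyRange_one, Bool.not_eq_eq_eq_not,
        Bool.not_true, and_imp]
      have hnotmem : ∀ q : Int × Int, (PySem.Set.contains block q = false) ↔ q ∉ block := by
        intro q
        rw [← PySem.Set.contains_iff]
        simp
      by_cases hlt : s.1 < t.1
      · simp only [if_pos hlt]
        constructor
        · intro h
          refine Or.inr ⟨hcol.1.symm, fun he => hcol.2 he.symm, ?_⟩
          rw [min_eq_right (le_of_lt hlt), max_eq_left (le_of_lt hlt), ← hcol.1]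
          exact (pvClearCol_iff hB hs3 hs4 hs1 ht2).mp
            (fun x h1 h2 => (hnotmem _).mp (h x h1 h2))
        · rintro (⟨_, h2, _⟩ | ⟨_, _, hclear⟩)
          · exact (h2 hcol.1.symm).elim
          · rw [min_eq_right (le_of_lt hlt), max_eq_left (le_of_lt hlt), ← hcol.1] at hclear
            intro x h1 h2
            exact (hnotmem _).mpr ((pvClearCol_iff hB hs3 hs4 hs1 ht2).mpr hclear x h1 h2)
      · have hlt' : t.1 < s.1 := by omega
        simp only [if_neg hlt]
        constructor
        · intro h
          refine Or.inr ⟨hcol.1.symm, fun he => hcol.2 he.symm, ?_⟩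
          rw [min_eq_left (le_of_lt hlt'), max_eq_right (le_of_lt hlt'), ← hcol.1]
          exact (pvClearCol_iff hB hs3 hs4 ht1 hs2).mp
            (fun x h1 h2 => (hnotmem _).mp (h x h1 h2))
        · rintro (⟨_, h2, _⟩ | ⟨_, _, hclear⟩)
          · exact (h2 hcol.1.symm).elim
          · rw [min_eq_left (le_of_lt hlt'), max_eq_right (le_of_lt hlt'), ← hcol.1] at hclear
            intro x h1 h2
            exact (hnotmem _).mpr ((pvClearCol_iff hB hs3 hs4 ht1 hs2).mpr hclear x h1 h2)
    · rw [if_neg hcol]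
      constructor
      · intro h; exact absurd h (by simp)
      rintro (⟨h1, h2, _⟩ | ⟨h1, h2, _⟩)
      · exact (hrow ⟨h1.symm, fun he => h2 he.symm⟩).elim
      · exact (hcol ⟨h1.symm, fun he => h2 he.symm⟩).elim

theorem pvCombo_iff {array : List (List String)}
    (hPre : ∀ r ∈ array, array.length ≤ r.length)
    {o1 o2 o3 : Int × Int} (h1 : o1 ∈ pvCells array "X") (h2 : o2 ∈ pvCells array "X")
    (h3 : o3 ∈ pvCells array "X") :
    pvRunCombo array (pvCells array "T") (pvCells array "S") (o1, o2, o3)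
      = pvHidden (pvCells array "T") (pvCells array "S")
          (PySem.Set.union (pvBlockedFold array) (PySem.Set.ofList [o1, o2, o3])) := by
  have hg : pvGInv array array.length := ⟨rfl, hPre⟩
  obtain ⟨hb11, hb12, hb13, hb14, hX1⟩ := pvMem_cells.mp h1
  obtain ⟨hb21, hb22, hb23, hb24, hX2⟩ := pvMem_cells.mp h2
  obtain ⟨hb31, hb32, hb33, hb34, hX3⟩ := pvMem_cells.mp h3
  have hgA : pvGInv (pvSet array o1.1 o1.2 "O") array.length := pvGInv_set hg hb11 hb12 _ _
  have hgB : pvGInv (pvSet (pvSet array o1.1 o1.2 "O") o2.1 o2.2 "O") array.length :=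
    pvGInv_set hgA hb21 hb22 _ _
  have hgg1 : pvGInv (pvSet (pvSet (pvSet array o1.1 o1.2 "O") o2.1 o2.2 "O") o3.1 o3.2 "O")
      array.length := pvGInv_set hgB hb31 hb32 _ _
  have hcell : ∀ a b : Int, 0 ≤ a → 0 ≤ b →
      pvCell (pvSet (pvSet (pvSet array o1.1 o1.2 "O") o2.1 o2.2 "O") o3.1 o3.2 "O") a b =
        if (a = o3.1 ∧ b = o3.2) ∨ (a = o2.1 ∧ b = o2.2) ∨ (a = o1.1 ∧ b = o1.2) then "O"
        else pvCell array a b := by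
    intro a b ha hb
    rw [pvCell_set hgB hb31 hb32 hb33 hb34 ha hb,
        pvCell_set hgA hb21 hb22 hb23 hb24 ha hb,
        pvCell_set hg hb11 hb12 hb13 hb14 ha hb]
    split_ifs with c3 c2 c1 cc <;> first | rfl | (exfalso; tauto)
  have hO1 : ∀ a b : Int, 0 ≤ a → 0 ≤ b →
      (pvCell (pvSet (pvSet (pvSet array o1.1 o1.2 "O") o2.1 o2.2 "O") o3.1 o3.2 "O") a b = "O"
        ↔ pvCell array a b = "O" ∨ (a, b) = o1 ∨ (a, b) = o2 ∨ (a, b) = o3) := by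
    intro a b ha hb
    rw [hcell a b ha hb]
    split_ifs with c
    · simp only [true_iff]
      rcases c with c | c | c
      · exact Or.inr (Or.inr (Or.inr (Prod.ext_iff.mpr ⟨c.1, c.2⟩)))
      · exact Or.inr (Or.inr (Or.inl (Prod.ext_iff.mpr ⟨c.1, c.2⟩)))
      · exact Or.inr (Or.inl (Prod.ext_iff.mpr ⟨c.1, c.2⟩))
    · constructor
      · exact Or.inl
      · rintro (h | h | h | h)
        · exact h
        · exact absurd (Prod.ext_iff.mp h) (fun hh => c (Or.inr (Or.inr hh)))
        · exact absurd (Prod.ext_iff.mp h) (fun hh => c (Or.inr (Or.inl hh)))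
        · exact absurd (Prod.ext_iff.mp h) (fun hh => c (Or.inl hh))
  have hS : ∀ s ∈ pvCells array "S",
      pvCell (pvSet (pvSet (pvSet array o1.1 o1.2 "O") o2.1 o2.2 "O") o3.1 o3.2 "O") s.1 s.2
        = "S" := by
    intro s hsmem
    obtain ⟨hsa, hsb, hsc, hsd, hsS⟩ := pvMem_cells.mp hsmem
    rw [hcell s.1 s.2 hsa hsc]
    split_ifs with c
    · exfalso
      rcases c with c | c | c
      · rw [c.1, c.2] at hsS; rw [hsS] at hX3; exact absurd hX3 (by decide)
      · rw [c.1, c.2] at hsS; rw [hsS] at hX2; exact absurd hX2 (by decide)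
      · rw [c.1, c.2] at hsS; rw [hsS] at hX1; exact absurd hX1 (by decide)
    · exact hsS
  have hB : ∀ a b : Int, 0 ≤ a → a < (array.length : Int) → 0 ≤ b → b < (array.length : Int) →
      ((a, b) ∈ PySem.Set.union (pvBlockedFold array) (PySem.Set.ofList [o1, o2, o3]) ↔
        pvCell (pvSet (pvSet (pvSet array o1.1 o1.2 "O") o2.1 o2.2 "O") o3.1 o3.2 "O") a b
          = "O") := by
    intro a b ha han hb hbn
    rw [PySem.Set.mem_union, PySem.Set.mem_ofList, hO1 a b ha hb, pvMem_blocked]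
    simp only [List.mem_cons, List.not_mem_nil, or_false]
    constructor
    · rintro (⟨_, _, _, _, hO⟩ | h | h | h)
      · exact Or.inl hO
      · exact Or.inr (Or.inl h)
      · exact Or.inr (Or.inr (Or.inl h))
      · exact Or.inr (Or.inr (Or.inr h))
    · rintro (hO | h | h | h)
      · exact Or.inl ⟨ha, han, hb, hbn, hO⟩
      · exact Or.inr (Or.inl h)
      · exact Or.inr (Or.inr (Or.inl h))
      · exact Or.inr (Or.inr (Or.inr h))
  unfold pvRunCombo pvHidden
  simp only [List.foldl_cons, List.foldl_nil]
  rw [Bool.eq_iff_iff, List.any_eq_true, List.any_eq_true]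
  have hper : ∀ s ∈ pvCells array "S",
      ((pvCell (List.foldl pvContamination
          (pvSet (pvSet (pvSet array o1.1 o1.2 "O") o2.1 o2.2 "O") o3.1 o3.2 "O")
          (pvCells array "T")) s.1 s.2 == "S") = true ↔
        ((pvCells array "T").all (fun t => !(pvSees
          (PySem.Set.union (pvBlockedFold array) (PySem.Set.ofList [o1, o2, o3])) t s))
          = true)) := by
    intro s hsmem
    obtain ⟨hsa, hsb, hsc, hsd, hsS⟩ := pvMem_cells.mp hsmem
    have hseeIff : ∀ t ∈ pvCells array "T",
        (pvSeesT (pvSet (pvSet (pvSet array o1.1 o1.2 "O") o2.1 o2.2 "O") o3.1 o3.2 "O")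
          ((array.length : Nat) : Int) t s.1 s.2 = true ↔
         pvSees (PySem.Set.union (pvBlockedFold array) (PySem.Set.ofList [o1, o2, o3])) t s
          = true) := by
      intro t htmem
      obtain ⟨hta, htb, htc, htd, htT⟩ := pvMem_cells.mp htmem
      rw [pvSeesT]
      rw [pvSees_iff (by omega) ⟨hta, by omega, htc, by omega⟩ ⟨hsa, by omega, hsc, by omega⟩
        (by rw [hS s hsmem]; decide)]
      rw [pvSees_port_iff hta htb htc htd hsa hsb hsc hsd hB]
    rw [beq_iff_eq, (pvCell_teachfold hgg1 (pvCells array "T") hsa hsc).2.2, hS s hsmem,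
      List.all_eq_true]
    by_cases hany : ((pvCells array "T").any
        (fun t => pvSeesT (pvSet (pvSet (pvSet array o1.1 o1.2 "O") o2.1 o2.2 "O") o3.1 o3.2 "O")
          ((array.length : Nat) : Int) t s.1 s.2)) = true
    · rw [if_pos hany]
      constructor
      · intro h; exact absurd h (by decide)
      · intro hall
        exfalso
        rw [List.any_eq_true] at hany
        obtain ⟨t, htmem, hsee⟩ := hany
        have := hall t htmem
        rw [Bool.not_eq_eq_eq_not, Bool.not_true] at this
        rw [(hseeIff t htmem)] at hsee
        rw [hsee] at this
        exact absurd this (by decide)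
    · rw [if_neg hany]
      constructor
      · intro _ t htmem
        rw [Bool.not_eq_eq_eq_not, Bool.not_true]
        by_cases hsee : pvSees
            (PySem.Set.union (pvBlockedFold array) (PySem.Set.ofList [o1, o2, o3])) t s = true
        · exfalso
          apply hany
          rw [List.any_eq_true]
          exact ⟨t, htmem, (hseeIff t htmem).mpr hsee⟩
        · exact Bool.not_eq_true _ ▸ (by simpa using hsee)
      · intro _; rfl
  constructor
  · rintro ⟨s, hsmem, hp⟩; exact ⟨s, hsmem, (hper s hsmem).mp hp⟩
  · rintro ⟨s, hsmem, hp⟩; exact ⟨s, hsmem, (hper s hsmem).mpr hp⟩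

theorem pvMain (array : List (List String)) (hPre : ∀ r ∈ array, array.length ≤ r.length) :
    solution array = solution_alt array := by
  unfold solution solution_alt
  rw [pvScanA_eq, pvScanB_eq]
  simp only []
  rw [pvALoop_eq_any]
  rw [Bool.eq_iff_iff, List.any_eq_true]
  simp only [List.any_eq_true, PySem.List.mem_pyRange_one]
  constructor
  · rintro ⟨p, hpmem, hrun⟩
    obtain ⟨i, j, k, hij, hjk, hkl, rfl⟩ := (pvMem_comb3 _ _).mp hpmem
    refine ⟨(i : Int), ⟨by omega, by exact_mod_cast by omega⟩,
            (j : Int), ⟨by omega, by exact_mod_cast by omega⟩,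
            (k : Int), ⟨by omega, by exact_mod_cast by omega⟩, ?_⟩
    rw [PySem.List.pyGetD_natCast, PySem.List.pyGetD_natCast, PySem.List.pyGetD_natCast]
    have hgd : ∀ q : Nat, q < (pvCells array "X").length →
        (pvCells array "X").getD q ((0 : Int), (0 : Int)) ∈ pvCells array "X" := by
      intro q hq
      rw [List.getD_eq_getElem?_getD, List.getElem?_eq_getElem hq]
      exact List.getElem_mem hq
    rw [← pvCombo_iff hPre (hgd i (by omega)) (hgd j (by omega)) (hgd k hkl)]
    have hdd : ((0 : Int), (0 : Int)) = (default : Int × Int) := rfl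
    rw [hdd]
    exact hrun
  · rintro ⟨a, ⟨ha0, ham⟩, b, ⟨hb0, hbm⟩, c, ⟨hc0, hcm⟩, hrun⟩
    have hlen : ∀ z : Int, z < ((pvCells array "X").length : Int) → 0 ≤ z →
        z.toNat < (pvCells array "X").length := by intro z h1 h2; omega
    refine ⟨((pvCells array "X").getD a.toNat default,
             (pvCells array "X").getD b.toNat default,
             (pvCells array "X").getD c.toNat default), ?_, ?_⟩
    · rw [pvMem_comb3]
      exact ⟨a.toNat, b.toNat, c.toNat, by omega, by omega, by omega, rfl⟩
    · have hgd : ∀ q : Nat, q < (pvCells array "X").length →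
          (pvCells array "X").getD q (default : Int × Int) ∈ pvCells array "X" := by
        intro q hq
        rw [List.getD_eq_getElem?_getD, List.getElem?_eq_getElem hq]
        exact List.getElem_mem hq
      rw [pvCombo_iff hPre (hgd a.toNat (by omega)) (hgd b.toNat (by omega))
        (hgd c.toNat (by omega))]
      rw [pyGetD_nonneg _ ha0, pyGetD_nonneg _ (by omega : (0:Int) ≤ b),
        pyGetD_nonneg _ (by omega : (0:Int) ≤ c)] at hrun
      have hdd : ((0 : Int), (0 : Int)) = (default : Int × Int) := rfl
      rw [hdd] at hrun
      exact hrun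

-- ===== VERDICT (by name: the statement is the Claim_ definition above) =====
theorem solution_spec : Claim_equal_solution := by
  intro array _hdom hpre
  unfold Spec_solution
  exact pvMain array hpre
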